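-- pv_equiv track=rewrite | github.com/pavlovsvpavel/SoftUni | python_advanced_may_2023/exam_exercises/multidimensional_lists/martian_explorer.py | find_deposits_and_rocks
-- ===== SOURCE A (Python) =====
-- def find_deposits_and_rocks(matrix, size):
--     water_dep = []
--     metal_dep = []
--     concrete_dep = []
--     rock = []
--     for i in range(size):
--         for j in range(size):
--             if matrix[i][j] == "W":
--                 water_dep.append((i, j))
--             elif matrix[i][j] == "M":
--                 metal_dep.append((i, j))
--             elif matrix[i][j] == "C":
--                 concrete_dep.append((i, j))
--             elif matrix[i][j] == "R":
--                 rock.append((i, j))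
--
--     return water_dep, metal_dep, concrete_dep, rock
-- ===== SOURCE B (Python) =====
-- def find_deposits_and_rocks(matrix, size):
--     def scan(ch):
--         return [(i, j) for i in range(size) for j in range(size) if matrix[i][j] == ch]
--     return scan("W"), scan("M"), scan("C"), scan("R")
-- ===== Notes on version B (the rewrite author's own statement) =====
-- stated objective: idiomatic
-- what changed: One fused pass with an if-elif ladder and four mutable accumulators is replaced by four independent row-major list comprehensions, one full scan per terrain character.
import Mathlib
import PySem

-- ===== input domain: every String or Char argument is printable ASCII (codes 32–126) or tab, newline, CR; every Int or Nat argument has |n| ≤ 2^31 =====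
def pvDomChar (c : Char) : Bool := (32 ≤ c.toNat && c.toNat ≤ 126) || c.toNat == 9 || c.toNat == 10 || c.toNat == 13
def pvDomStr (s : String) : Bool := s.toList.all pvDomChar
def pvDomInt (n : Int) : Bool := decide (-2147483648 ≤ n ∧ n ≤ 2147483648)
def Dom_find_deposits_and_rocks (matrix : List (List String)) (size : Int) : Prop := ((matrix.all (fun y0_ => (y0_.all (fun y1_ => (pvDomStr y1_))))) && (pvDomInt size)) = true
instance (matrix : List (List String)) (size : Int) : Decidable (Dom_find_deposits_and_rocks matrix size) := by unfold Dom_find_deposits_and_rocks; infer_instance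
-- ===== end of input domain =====

-- B replaces A's single fused pass with an if-elif ladder and four accumulators by four
-- independent row-major comprehension scans, one per terrain character (idiomatic; same cost).

-- shared indexing helper: matrix[i][j] (none exactly where Python raises IndexError)
def pvAt (matrix : List (List String)) (i j : Int) : Option String :=
  (PySem.List.pyGet? matrix i).bind (fun row => PySem.List.pyGet? row j)

-- ===== PORT A =====
-- A's inner-loop body: the if-elif ladder appending (i, j) to one of the four accumulators
def pvStepA (matrix : List (List String)) (i : Int)
    (acc : (List (Int × Int)) × (List (Int × Int)) × (List (Int × Int)) × (List (Int × Int)))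
    (j : Int) : (List (Int × Int)) × (List (Int × Int)) × (List (Int × Int)) × (List (Int × Int)) :=
  if pvAt matrix i j = some "W" then (acc.1 ++ [(i, j)], acc.2.1, acc.2.2.1, acc.2.2.2)
  else if pvAt matrix i j = some "M" then (acc.1, acc.2.1 ++ [(i, j)], acc.2.2.1, acc.2.2.2)
  else if pvAt matrix i j = some "C" then (acc.1, acc.2.1, acc.2.2.1 ++ [(i, j)], acc.2.2.2)
  else if pvAt matrix i j = some "R" then (acc.1, acc.2.1, acc.2.2.1, acc.2.2.2 ++ [(i, j)])
  else acc

def find_deposits_and_rocks (matrix : List (List String)) (size : Int) : (List (Int × Int)) × (List (Int × Int)) × (List (Int × Int)) × (List (Int × Int)) :=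
  (PySem.List.pyRange 0 size 1).foldl
    (fun acc i => (PySem.List.pyRange 0 size 1).foldl (pvStepA matrix i) acc)
    ([], [], [], [])

-- ===== PORT B =====
-- one full row-major scan of the matrix for one terrain character
def pvScan (matrix : List (List String)) (size : Int) (ch : String) : List (Int × Int) :=
  (PySem.List.pyRange 0 size 1).flatMap (fun i =>
    (PySem.List.pyRange 0 size 1).filterMap (fun j =>
      if pvAt matrix i j = some ch then some (i, j) else none))

def find_deposits_and_rocks_alt (matrix : List (List String)) (size : Int) : (List (Int × Int)) × (List (Int × Int)) × (List (Int × Int)) × (List (Int × Int)) :=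
  (pvScan matrix size "W", pvScan matrix size "M", pvScan matrix size "C", pvScan matrix size "R")

-- ===== PRECONDITION & SPEC =====
-- Pre_ excludes exactly the inputs where Python A raises IndexError: size rows must exist and
-- each of the first size rows must have at least size entries.
def Pre_find_deposits_and_rocks (matrix : List (List String)) (size : Int) : Prop :=
  size ≤ (matrix.length : Int) ∧ ∀ row ∈ matrix.take size.toNat, size ≤ (row.length : Int)
instance (matrix : List (List String)) (size : Int) : Decidable (Pre_find_deposits_and_rocks matrix size) := by unfold Pre_find_deposits_and_rocks; infer_instance

def pvWitness_find_deposits_and_rocks : List (List String) × Int := ([["W", "M"], ["C", "."]], 2)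

def Spec_find_deposits_and_rocks (matrix : List (List String)) (size : Int) (out : (List (Int × Int)) × (List (Int × Int)) × (List (Int × Int)) × (List (Int × Int))) : Prop := out = find_deposits_and_rocks_alt matrix size
instance (matrix : List (List String)) (size : Int) (out : (List (Int × Int)) × (List (Int × Int)) × (List (Int × Int)) × (List (Int × Int))) : Decidable (Spec_find_deposits_and_rocks matrix size out) := by unfold Spec_find_deposits_and_rocks; infer_instance

-- ===== CLAIM (what is proved, stated in full; the proofs are below) =====
def Claim_equal_find_deposits_and_rocks : Prop := ∀ (matrix : List (List String)) (size : Int), Dom_find_deposits_and_rocks matrix size → Pre_find_deposits_and_rocks matrix size → Spec_find_deposits_and_rocks matrix size (find_deposits_and_rocks matrix size)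

-- ===== LEMMAS AND PROOFS =====

lemma pvInner (matrix : List (List String)) (i : Int) (L : List Int)
    (acc : (List (Int × Int)) × (List (Int × Int)) × (List (Int × Int)) × (List (Int × Int))) :
    L.foldl (pvStepA matrix i) acc =
      (acc.1 ++ L.filterMap (fun j => if pvAt matrix i j = some "W" then some (i, j) else none),
       acc.2.1 ++ L.filterMap (fun j => if pvAt matrix i j = some "M" then some (i, j) else none),
       acc.2.2.1 ++ L.filterMap (fun j => if pvAt matrix i j = some "C" then some (i, j) else none),
       acc.2.2.2 ++ L.filterMap (fun j => if pvAt matrix i j = some "R" then some (i, j) else none)) := by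
  induction L generalizing acc with
  | nil => simp
  | cons j L ih =>
    simp only [List.foldl_cons, List.filterMap_cons, ih]
    by_cases hW : pvAt matrix i j = some "W"
    · simp [pvStepA, hW]
    · by_cases hM : pvAt matrix i j = some "M"
      · simp [pvStepA, hM]
      · by_cases hC : pvAt matrix i j = some "C"
        · simp [pvStepA, hC]
        · by_cases hR : pvAt matrix i j = some "R"
          · simp [pvStepA, hR]
          · simp [pvStepA, hW, hM, hC, hR]

lemma pvOuter (matrix : List (List String)) (Li Lj : List Int)
    (acc : (List (Int × Int)) × (List (Int × Int)) × (List (Int × Int)) × (List (Int × Int))) :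
    Li.foldl (fun acc i => Lj.foldl (pvStepA matrix i) acc) acc =
      (acc.1 ++ Li.flatMap (fun i => Lj.filterMap (fun j => if pvAt matrix i j = some "W" then some (i, j) else none)),
       acc.2.1 ++ Li.flatMap (fun i => Lj.filterMap (fun j => if pvAt matrix i j = some "M" then some (i, j) else none)),
       acc.2.2.1 ++ Li.flatMap (fun i => Lj.filterMap (fun j => if pvAt matrix i j = some "C" then some (i, j) else none)),
       acc.2.2.2 ++ Li.flatMap (fun i => Lj.filterMap (fun j => if pvAt matrix i j = some "R" then some (i, j) else none))) := by
  induction Li generalizing acc with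
  | nil => simp
  | cons i Li ih =>
    rw [List.foldl_cons, pvInner, ih]
    simp [List.append_assoc]

-- ===== VERDICT (by name: the statement is the Claim_ definition above) =====
theorem find_deposits_and_rocks_spec : Claim_equal_find_deposits_and_rocks := by
  intro matrix size _ _
  unfold Spec_find_deposits_and_rocks find_deposits_and_rocks find_deposits_and_rocks_alt pvScan
  rw [pvOuter]
  simp
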